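-- pv_equiv track=rewrite | github.com/Lincy-Lin/ttsky-verilog-template-lin | test/test.py | sobel_model
-- ===== SOURCE A (Python) =====
-- IMG_SIZE     = 6
--
-- OUTPUT_BITS  = 8
--
-- def sobel_model(image, img_size=IMG_SIZE, output_bits=OUTPUT_BITS):
--     """
--     Pure-Python Sobel model that mirrors the RTL exactly.
--     image: list of img_size*img_size uint8 values, row-major.
--     Returns: list of img_size*img_size output values (same order).
--     """
--     output_shift = 8 - output_bits
--     results = []
--     # Two line buffers, initialised to 0
--     linebuf1 = [0] * img_size
--     linebuf2 = [0] * img_size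
--     # Six pipeline registers (two per row of the 3×3 window)
--     r0_0 = r0_1 = 0   # current row,  two cycles ago / one cycle ago
--     r1_0 = r1_1 = 0   # row-1
--     r2_0 = r2_1 = 0   # row-2
--
--     for row in range(img_size):
--         for col in range(img_size):
--             pixel_in = image[row * img_size + col]
--
--             # Read from line buffers BEFORE writing (non-blocking semantics)
--             row1_col2 = linebuf1[col]
--             row2_col2 = linebuf2[col]
--
--             # Build the 3×3 window
--             p00, p01, p02 = r2_0, r2_1, row2_col2
--             p10, p11, p12 = r1_0, r1_1, row1_col2
--             p20, p21, p22 = r0_0, r0_1, pixel_in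
--
--             # Sobel kernels (no multiply, just shift+add)
--             gx = (-p00 + p02 - 2*p10 + 2*p12 - p20 + p22)
--             gy = ( p00 + 2*p01 + p02 - p20 - 2*p21 - p22)
--
--             # Clip to 12-bit signed range the RTL would produce
--             def clip12s(v):
--                 v &= 0xFFF
--                 return v - 0x1000 if v >= 0x800 else v
--
--             gx = clip12s(gx)
--             gy = clip12s(gy)
--
--             abs_gx = abs(gx) & 0xFFF
--             abs_gy = abs(gy) & 0xFFF
--             mag = (abs_gx + abs_gy) & 0x1FFF          # 13-bit
--             mag_sat8 = 0xFF if mag > 255 else mag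
--             edge = (mag_sat8 >> output_shift) & 0xFF
--
--             valid_window = (row >= 2) and (col >= 2)
--             results.append(edge if valid_window else 0)
--
--             # Update line buffers
--             linebuf2[col] = row1_col2
--             linebuf1[col] = pixel_in
--
--             # Update shift registers
--             if col == img_size - 1:
--                 r0_0 = r0_1 = 0
--                 r1_0 = r1_1 = 0
--                 r2_0 = r2_1 = 0
--             else:
--                 r2_0, r2_1 = r2_1, pixel_in
--                 r1_0, r1_1 = r1_1, row1_col2
--                 r0_0, r0_1 = r0_1, row2_col2
--
--     return results
-- ===== SOURCE B (Python) =====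
-- def sobel_model(image, img_size=6, output_bits=8):
--     """
--     Stateless re-implementation: instead of simulating line buffers and
--     pipeline registers, read the nine window pixels the pipeline actually
--     produces directly from the image with fixed 2D offsets.
--     """
--     output_shift = 8 - output_bits
--     results = []
--     for row in range(img_size):
--         for col in range(img_size):
--             if row < 2 or col < 2:
--                 results.append(0)
--                 continue
--             px = lambda r, c: image[r * img_size + c]
--             p00 = px(row,     col - 2)
--             p01 = px(row,     col - 1)
--             p02 = px(row - 2, col)
--             p10 = px(row - 1, col - 2)
--             p11 = px(row - 1, col - 1)
--             p12 = px(row - 1, col)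
--             p20 = px(row - 2, col - 2)
--             p21 = px(row - 2, col - 1)
--             p22 = px(row,     col)
--             gx = (-p00 + p02 - 2*p10 + 2*p12 - p20 + p22)
--             gy = ( p00 + 2*p01 + p02 - p20 - 2*p21 - p22)
--             def clip12s(v):
--                 v &= 0xFFF
--                 return v - 0x1000 if v >= 0x800 else v
--             gx = clip12s(gx)
--             gy = clip12s(gy)
--             mag = ((abs(gx) & 0xFFF) + (abs(gy) & 0xFFF)) & 0x1FFF
--             mag_sat8 = 0xFF if mag > 255 else mag
--             results.append((mag_sat8 >> output_shift) & 0xFF)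
--     return results
-- ===== Notes on version B (the rewrite author's own statement) =====
-- stated objective: simpler
-- what changed: Replaces the stateful line-buffer/shift-register pipeline simulation with a stateless pass that reads the nine window pixels directly from the image via the fixed 2D offsets the pipeline produces.
import Mathlib
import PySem

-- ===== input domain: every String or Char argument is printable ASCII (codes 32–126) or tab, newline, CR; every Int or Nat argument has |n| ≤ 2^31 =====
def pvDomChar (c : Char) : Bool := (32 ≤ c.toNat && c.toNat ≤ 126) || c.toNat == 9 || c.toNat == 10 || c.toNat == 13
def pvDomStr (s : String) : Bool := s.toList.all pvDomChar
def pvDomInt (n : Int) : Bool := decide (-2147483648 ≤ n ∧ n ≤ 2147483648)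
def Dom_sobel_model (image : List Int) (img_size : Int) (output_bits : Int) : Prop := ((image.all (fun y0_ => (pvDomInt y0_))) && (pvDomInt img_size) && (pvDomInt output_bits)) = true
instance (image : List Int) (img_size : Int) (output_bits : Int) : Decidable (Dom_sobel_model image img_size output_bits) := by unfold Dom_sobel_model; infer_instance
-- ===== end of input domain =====

-- B replaces A's line-buffer/shift-register pipeline simulation with stateless direct 2D
-- indexing using the exact window offsets the pipeline produces (objective: simpler).

-- ===== PORT A =====

-- clip12s: Python 'v &= 0xFFF; return v - 0x1000 if v >= 0x800 else v' (exact: PySem.Int.band)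
def pvClip12sA (v : Int) : Int :=
  let v := PySem.Int.band v 0xFFF
  if v ≥ 0x800 then v - 0x1000 else v

-- pipeline state: results, the two line buffers, the six shift registers
structure PvStateA where
  res : List Int
  lb1 : List Int
  lb2 : List Int
  r00 : Int
  r01 : Int
  r10 : Int
  r11 : Int
  r20 : Int
  r21 : Int
  deriving Repr, DecidableEq

-- image[i] read; in range on every input Pre_ admits (Python raises IndexError otherwise)
def pvReadA (xs : List Int) (i : Int) : Int := (PySem.List.pyGet? xs i).getD 0

-- one inner-loop iteration of A (row, col are the range(img_size) counters)
def pvStepA (image : List Int) (n : Nat) (output_shift : Int) (row col : Nat) (s : PvStateA) : PvStateA :=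
  let pixel_in := pvReadA image ((row * n + col : Nat) : Int)
  let row1_col2 := pvReadA s.lb1 (col : Int)
  let row2_col2 := pvReadA s.lb2 (col : Int)
  -- p00,p01,p02 = r2_0,r2_1,row2_col2 ; p10,p11,p12 = r1_0,r1_1,row1_col2 ; p20,p21,p22 = r0_0,r0_1,pixel_in
  let gx := -s.r20 + row2_col2 - 2 * s.r10 + 2 * row1_col2 - s.r00 + pixel_in
  let gy := s.r20 + 2 * s.r21 + row2_col2 - s.r00 - 2 * s.r01 - pixel_in
  let gx := pvClip12sA gx
  let gy := pvClip12sA gy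
  let abs_gx := PySem.Int.band |gx| 0xFFF
  let abs_gy := PySem.Int.band |gy| 0xFFF
  let mag := PySem.Int.band (abs_gx + abs_gy) 0x1FFF
  let mag_sat8 := if mag > 255 then (0xFF : Int) else mag
  -- '>>' with nonnegative shift (Pre_ gives output_bits ≤ 8, Python raises ValueError otherwise)
  let edge := PySem.Int.band (mag_sat8 >>> output_shift.toNat) 0xFF
  let valid_window := decide (2 ≤ row) && decide (2 ≤ col)
  let res := s.res ++ [if valid_window then edge else 0]
  let lb2 := s.lb2.set col row1_col2
  let lb1 := s.lb1.set col pixel_in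
  if col = n - 1 then
    ⟨res, lb1, lb2, 0, 0, 0, 0, 0, 0⟩
  else
    ⟨res, lb1, lb2, s.r01, row2_col2, s.r11, row1_col2, s.r21, pixel_in⟩

def sobel_model (image : List Int) (img_size : Int) (output_bits : Int) : List Int :=
  let output_shift := 8 - output_bits
  let n := img_size.toNat
  let init : PvStateA := ⟨[], List.replicate n 0, List.replicate n 0, 0, 0, 0, 0, 0, 0⟩
  let final := (List.range n).foldl
    (fun s row => (List.range n).foldl (fun s col => pvStepA image n output_shift row col s) s)
    init
  final.res

-- ===== PORT B =====

def pvClip12sB (v : Int) : Int :=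
  let v := PySem.Int.band v 0xFFF
  if v ≥ 0x800 then v - 0x1000 else v

-- image[r*img_size + c]; in range on every input Pre_ admits
def pvPxB (image : List Int) (n : Nat) (r c : Int) : Int :=
  (PySem.List.pyGet? image (r * (n : Int) + c)).getD 0

-- the valid-window cell value at (row, col), row ≥ 2 ∧ col ≥ 2
def pvCellB (image : List Int) (n : Nat) (output_shift : Int) (r c : Int) : Int :=
  let p00 := pvPxB image n r (c - 2)
  let p01 := pvPxB image n r (c - 1)
  let p02 := pvPxB image n (r - 2) c
  let p10 := pvPxB image n (r - 1) (c - 2)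
  let _p11 := pvPxB image n (r - 1) (c - 1)
  let p12 := pvPxB image n (r - 1) c
  let p20 := pvPxB image n (r - 2) (c - 2)
  let p21 := pvPxB image n (r - 2) (c - 1)
  let p22 := pvPxB image n r c
  let gx := -p00 + p02 - 2 * p10 + 2 * p12 - p20 + p22
  let gy := p00 + 2 * p01 + p02 - p20 - 2 * p21 - p22
  let gx := pvClip12sB gx
  let gy := pvClip12sB gy
  let mag := PySem.Int.band (PySem.Int.band |gx| 0xFFF + PySem.Int.band |gy| 0xFFF) 0x1FFF
  let mag_sat8 := if mag > 255 then (0xFF : Int) else mag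
  PySem.Int.band (mag_sat8 >>> output_shift.toNat) 0xFF
  -- note p11 is gathered but unused by the kernels, exactly as in the pipeline window

def pvBodyB (image : List Int) (n : Nat) (output_shift : Int) (row col : Nat) : Int :=
  if (row : Int) < 2 ∨ (col : Int) < 2 then 0
  else pvCellB image n output_shift (row : Int) (col : Int)

def sobel_model_alt (image : List Int) (img_size : Int) (output_bits : Int) : List Int :=
  let output_shift := 8 - output_bits
  let n := img_size.toNat
  (List.range n).flatMap (fun row => (List.range n).map (fun col => pvBodyB image n output_shift row col))

-- ===== PRECONDITION & SPEC =====
-- Pre_ excludes exactly the inputs where the Python A raises: an image shorter than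
-- img_size*img_size (IndexError) or output_bits > 8 (negative shift count, ValueError),
-- whenever the loops run at all (img_size > 0).
def Pre_sobel_model (image : List Int) (img_size : Int) (output_bits : Int) : Prop :=
  img_size ≤ 0 ∨ (img_size * img_size ≤ (image.length : Int) ∧ output_bits ≤ 8)
instance (image : List Int) (img_size : Int) (output_bits : Int) : Decidable (Pre_sobel_model image img_size output_bits) := by unfold Pre_sobel_model; infer_instance

def pvWitness_sobel_model : List Int × Int × Int :=
  ([10, 200, 30, 0, 50, 60, 7, 80, 90], 3, 8)

def Spec_sobel_model (image : List Int) (img_size : Int) (output_bits : Int) (out : List Int) : Prop := out = sobel_model_alt image img_size output_bits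
instance (image : List Int) (img_size : Int) (output_bits : Int) (out : List Int) : Decidable (Spec_sobel_model image img_size output_bits out) := by unfold Spec_sobel_model; infer_instance

-- ===== CLAIM (what is proved, stated in full; the proofs are below) =====
def Claim_equal_sobel_model : Prop := ∀ (image : List Int) (img_size : Int) (output_bits : Int), Dom_sobel_model image img_size output_bits → Pre_sobel_model image img_size output_bits → Spec_sobel_model image img_size output_bits (sobel_model image img_size output_bits)
-- ===== LEMMAS AND PROOFS =====

def pvP (image : List Int) (n : Nat) (r c : Int) : Int :=
  if r < 0 ∨ c < 0 then 0 else pvPxB image n r c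

def pvInv (image : List Int) (n : Nat) (r c : Nat) (s : PvStateA) : Prop :=
  s.lb1.length = n ∧ s.lb2.length = n ∧
  (∀ j : Nat, j < n → pvReadA s.lb1 (j : Int) = if j < c then pvP image n r j else pvP image n ((r : Int) - 1) j) ∧
  (∀ j : Nat, j < n → pvReadA s.lb2 (j : Int) = if j < c then pvP image n ((r : Int) - 1) j else pvP image n ((r : Int) - 2) j) ∧
  s.r20 = pvP image n r ((c : Int) - 2) ∧ s.r21 = pvP image n r ((c : Int) - 1) ∧
  s.r10 = pvP image n ((r : Int) - 1) ((c : Int) - 2) ∧ s.r11 = pvP image n ((r : Int) - 1) ((c : Int) - 1) ∧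
  s.r00 = pvP image n ((r : Int) - 2) ((c : Int) - 2) ∧ s.r01 = pvP image n ((r : Int) - 2) ((c : Int) - 1)

theorem pvP_neg_right (image : List Int) (n : Nat) (r c : Int) (h : c < 0) : pvP image n r c = 0 := by
  simp [pvP, h]
theorem pvP_of_nonneg (image : List Int) (n : Nat) (r c : Int) (hr : 0 ≤ r) (hc : 0 ≤ c) :
    pvP image n r c = pvPxB image n r c := by
  simp [pvP]; omega

theorem pvP_natCast (image : List Int) (n : Nat) (r c : Nat) :
    pvReadA image ((r * n + c : Nat) : Int) = pvP image n (r : Int) (c : Int) := by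
  have : ((r * n + c : Nat) : Int) = (r : Int) * (n : Int) + (c : Int) := by push_cast; ring
  rw [pvP_of_nonneg _ _ _ _ (by positivity) (by positivity)]
  simp [pvReadA, pvPxB, this]

theorem pvReadA_set (xs : List Int) (i : Nat) (v : Int) (j : Nat) (hi : i < xs.length) :
    pvReadA (xs.set i v) (j : Int) = if j = i then v else pvReadA xs (j : Int) := by
  simp only [pvReadA, PySem.List.pyGet?_natCast, List.getElem?_set]
  by_cases h : j = i
  · simp [h, hi]
  · have : ¬ (i = j) := fun h' => h h'.symm
    simp [h, this]
theorem pvInit_inv (image : List Int) (n : Nat) :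
    pvInv image n 0 0 ⟨[], List.replicate n 0, List.replicate n 0, 0, 0, 0, 0, 0, 0⟩ := by
  refine ⟨by simp, by simp, ?_, ?_, ?_, ?_, ?_, ?_, ?_, ?_⟩ <;>
    first
      | (simp [pvReadA, pvP, List.getElem?_replicate]; intro j hj; simp [hj])
      | simp [pvReadA, pvP, List.getElem?_replicate]

theorem pvStepA_spec (image : List Int) (n : Nat) (os : Int) (r c : Nat) (s : PvStateA)
    (hc : c < n) (h : pvInv image n r c s) :
    (pvStepA image n os r c s).res = s.res ++ [pvBodyB image n os r c] ∧
    (if c + 1 = n then pvInv image n (r + 1) 0 (pvStepA image n os r c s)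
     else pvInv image n r (c + 1) (pvStepA image n os r c s)) := by
  obtain ⟨hl1, hl2, hb1, hb2, h20, h21, h10, h11, h00, h01⟩ := h
  have hpix : pvReadA image ((r * n + c : Nat) : Int) = pvP image n (r : Int) (c : Int) :=
    pvP_natCast image n r c
  have hrow1 : pvReadA s.lb1 (c : Int) = pvP image n ((r : Int) - 1) (c : Int) := by
    rw [hb1 c hc]; simp
  have hrow2 : pvReadA s.lb2 (c : Int) = pvP image n ((r : Int) - 2) (c : Int) := by
    rw [hb2 c hc]; simp
  constructor
  · -- emitted value
    have hres : (pvStepA image n os r c s).res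
        = s.res ++ [if (decide (2 ≤ r) && decide (2 ≤ c)) then
            PySem.Int.band
              ((if PySem.Int.band (PySem.Int.band |pvClip12sA (-s.r20 + pvReadA s.lb2 (c:Int) - 2*s.r10 + 2*pvReadA s.lb1 (c:Int) - s.r00 + pvReadA image ((r*n+c:Nat):Int))| 0xFFF + PySem.Int.band |pvClip12sA (s.r20 + 2*s.r21 + pvReadA s.lb2 (c:Int) - s.r00 - 2*s.r01 - pvReadA image ((r*n+c:Nat):Int))| 0xFFF) 0x1FFF > 255 then (0xFF:Int) else PySem.Int.band (PySem.Int.band |pvClip12sA (-s.r20 + pvReadA s.lb2 (c:Int) - 2*s.r10 + 2*pvReadA s.lb1 (c:Int) - s.r00 + pvReadA image ((r*n+c:Nat):Int))| 0xFFF + PySem.Int.band |pvClip12sA (s.r20 + 2*s.r21 + pvReadA s.lb2 (c:Int) - s.r00 - 2*s.r01 - pvReadA image ((r*n+c:Nat):Int))| 0xFFF) 0x1FFF) >>> os.toNat) 0xFF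
          else 0] := by
      unfold pvStepA
      by_cases hcl : c = n - 1 <;> simp [hcl]
    rw [hres]
    by_cases hr2 : 2 ≤ r
    · by_cases hc2 : 2 ≤ c
      · have hr2' : ¬ ((r:Int) < 2 ∨ (c:Int) < 2) := by omega
        simp only [pvBodyB, if_neg hr2', hr2, hc2, decide_true, Bool.and_self, if_true]
        rw [hpix, hrow1, hrow2, h20, h21, h10, h00, h01]
        rw [pvP_of_nonneg _ _ _ _ (by omega) (by omega), pvP_of_nonneg _ _ _ _ (by omega) (by omega),
            pvP_of_nonneg _ _ _ _ (by omega) (by omega), pvP_of_nonneg _ _ _ _ (by omega) (by omega),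
            pvP_of_nonneg _ _ _ _ (by omega) (by omega), pvP_of_nonneg _ _ _ _ (by omega) (by omega),
            pvP_of_nonneg _ _ _ _ (by omega) (by omega), pvP_of_nonneg _ _ _ _ (by omega) (by omega)]
        simp only [pvCellB, pvClip12sA, pvClip12sB]
      · have : (r:Int) < 2 ∨ (c:Int) < 2 := by omega
        simp only [pvBodyB, if_pos this]
        simp [hc2]
    · have : (r:Int) < 2 ∨ (c:Int) < 2 := by omega
      simp only [pvBodyB, if_pos this]
      simp [hr2]
  · by_cases hcl : c = n - 1
    · have hcn : c + 1 = n := by omega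
      rw [if_pos hcn]
      have e3 : ((r + 1 : Nat) : Int) - 1 = (r : Int) := by omega
      have e4 : ((r + 1 : Nat) : Int) - 2 = (r : Int) - 1 := by omega
      unfold pvStepA
      simp only [if_pos hcl]
      refine ⟨by simp [hl1], by simp [hl2], ?_, ?_, ?_, ?_, ?_, ?_, ?_, ?_⟩
      · intro j hj
        rw [pvReadA_set _ _ _ _ (by omega)]
        simp only [Nat.not_lt_zero, if_false, e3]
        by_cases hjc : j = c
        · subst hjc; rw [hpix, if_pos rfl]
        · rw [if_neg hjc, hb1 j hj, if_pos (by omega)]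
      · intro j hj
        rw [pvReadA_set _ _ _ _ (by omega)]
        simp only [Nat.not_lt_zero, if_false, e4]
        by_cases hjc : j = c
        · subst hjc; rw [hrow1, if_pos rfl]
        · rw [if_neg hjc, hb2 j hj, if_pos (by omega)]
      all_goals rw [pvP_neg_right _ _ _ _ (by omega)]
    · have hcn : ¬ (c + 1 = n) := by omega
      rw [if_neg hcn]
      have e1 : ((c + 1 : Nat) : Int) - 2 = (c : Int) - 1 := by omega
      have e2 : ((c + 1 : Nat) : Int) - 1 = (c : Int) := by omega
      unfold pvStepA
      simp only [if_neg hcl]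
      refine ⟨by simp [hl1], by simp [hl2], ?_, ?_, ?_, ?_, ?_, ?_, ?_, ?_⟩
      · intro j hj
        rw [pvReadA_set _ _ _ _ (by omega)]
        by_cases hjc : j = c
        · subst hjc; rw [if_pos rfl, hpix, if_pos (by omega)]
        · rw [if_neg hjc, hb1 j hj]
          by_cases hjlt : j < c
          · rw [if_pos hjlt, if_pos (by omega)]
          · rw [if_neg hjlt, if_neg (by omega)]
      · intro j hj
        rw [pvReadA_set _ _ _ _ (by omega)]
        by_cases hjc : j = c
        · subst hjc; rw [if_pos rfl, hrow1, if_pos (by omega)]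
        · rw [if_neg hjc, hb2 j hj]
          by_cases hjlt : j < c
          · rw [if_pos hjlt, if_pos (by omega)]
          · rw [if_neg hjlt, if_neg (by omega)]
      · rw [e1]; exact h21
      · rw [e2]; exact hpix
      · rw [e1]; exact h11
      · rw [e2]; exact hrow1
      · rw [e1]; exact h01
      · rw [e2]; exact hrow2

theorem pvRowA_spec (image : List Int) (n : Nat) (os : Int) (r : Nat) :
    ∀ (k c : Nat) (s : PvStateA), c + k = n → pvInv image n r c s →
      ((List.range' c k).foldl (fun s col => pvStepA image n os r col s) s).res
        = s.res ++ (List.range' c k).map (pvBodyB image n os r) ∧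
      (0 < k → pvInv image n (r + 1) 0 ((List.range' c k).foldl (fun s col => pvStepA image n os r col s) s)) := by
  intro k
  induction k with
  | zero => intro c s _ _; simp
  | succ k ih =>
    intro c s hck hinv
    have hc : c < n := by omega
    obtain ⟨hres, hinv'⟩ := pvStepA_spec image n os r c s hc hinv
    rw [List.range'_succ, List.foldl_cons, List.map_cons]
    by_cases hk : k = 0
    · subst hk
      have hcn : c + 1 = n := by omega
      rw [if_pos hcn] at hinv'
      simp only [List.range'_zero, List.foldl_nil, List.map_nil]
      exact ⟨hres, fun _ => hinv'⟩
    · have hcn : ¬ (c + 1 = n) := by omega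
      rw [if_neg hcn] at hinv'
      obtain ⟨ihres, ihinv⟩ := ih (c + 1) (pvStepA image n os r c s) (by omega) hinv'
      refine ⟨?_, fun _ => ihinv (by omega)⟩
      rw [ihres, hres, List.append_assoc, List.singleton_append]

theorem pvRowsA_spec (image : List Int) (n : Nat) (os : Int) (hn : 0 < n) :
    ∀ (m r : Nat) (s : PvStateA), pvInv image n r 0 s →
      ((List.range' r m).foldl (fun s row => (List.range n).foldl (fun s col => pvStepA image n os row col s) s) s).res
        = s.res ++ (List.range' r m).flatMap (fun row => (List.range n).map (pvBodyB image n os row)) ∧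
      pvInv image n (r + m) 0 ((List.range' r m).foldl (fun s row => (List.range n).foldl (fun s col => pvStepA image n os row col s) s) s) := by
  intro m
  induction m with
  | zero => intro r s hinv; simpa using hinv
  | succ m ih =>
    intro r s hinv
    have h := pvRowA_spec image n os r n 0 s (by omega) hinv
    have hres := h.1
    have hinv' := h.2 hn
    rw [List.range'_succ, List.foldl_cons, List.flatMap_cons]
    rw [← List.range_eq_range'] at hres hinv'
    obtain ⟨ihres, ihinv⟩ := ih (r + 1) _ hinv'
    constructor
    · rw [ihres, hres, List.append_assoc]
    · have : r + (m + 1) = (r + 1) + m := by omega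
      rw [this]; exact ihinv

-- ===== VERDICT (by name: the statement is the Claim_ definition above) =====

theorem sobel_model_spec : Claim_equal_sobel_model := by
  intro image img_size output_bits _ _
  unfold Spec_sobel_model
  simp only [sobel_model, sobel_model_alt]
  by_cases hn : img_size.toNat = 0
  · simp [hn]
  · have h0 : 0 < img_size.toNat := Nat.pos_of_ne_zero hn
    have h := pvRowsA_spec image img_size.toNat (8 - output_bits) h0 img_size.toNat 0
      ⟨[], List.replicate img_size.toNat 0, List.replicate img_size.toNat 0, 0, 0, 0, 0, 0, 0⟩
      (pvInit_inv image img_size.toNat)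
    rw [← List.range_eq_range'] at h
    rw [h.1, List.nil_append]
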